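-- pv_equiv track=rewrite | github.com/Ad-Deen/AGV-Project_Automama-Software_stack | perception/pidnettest/test10(yolonew).py | get_colormap_for_labels
-- ===== SOURCE A (Python) =====
-- def get_colormap_for_labels(labels_to_show, full_colormap, invalid_color=(0, 0, 0)):
--     """
--     Generate a custom colormap where only the specified labels are shown.
--     All other labels are set to `invalid_color`.
--     If labels_to_show is empty, return the full colormap unchanged.
--     """
--     if not labels_to_show:  # Empty list: show all labels
--         return full_colormap
--
--     colormap = []
--     for idx in range(len(full_colormap)):
--         if idx in labels_to_show:
--             colormap.append(full_colormap[idx])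
--         else:
--             colormap.append(invalid_color)
--
--     return colormap
-- ===== SOURCE B (Python) =====
-- def get_colormap_for_labels(labels_to_show, full_colormap, invalid_color=(0, 0, 0)):
--     if not labels_to_show:
--         return full_colormap
--     n = len(full_colormap)
--     keep = sorted({x for x in labels_to_show if 0 <= x < n})
--     out = []
--     prev = 0
--     for k in keep:
--         out += [invalid_color] * (k - prev)
--         out.append(full_colormap[k])
--         prev = k + 1
--     out += [invalid_color] * (n - prev)
--     return out
-- ===== Notes on version B (the rewrite author's own statement) =====
-- stated objective: alternative
-- what changed: Instead of scanning every index and testing membership in labels_to_show, B sorts the distinct in-range labels and emits the result in one pass as runs of invalid_color between consecutive kept labels.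
import Mathlib
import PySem

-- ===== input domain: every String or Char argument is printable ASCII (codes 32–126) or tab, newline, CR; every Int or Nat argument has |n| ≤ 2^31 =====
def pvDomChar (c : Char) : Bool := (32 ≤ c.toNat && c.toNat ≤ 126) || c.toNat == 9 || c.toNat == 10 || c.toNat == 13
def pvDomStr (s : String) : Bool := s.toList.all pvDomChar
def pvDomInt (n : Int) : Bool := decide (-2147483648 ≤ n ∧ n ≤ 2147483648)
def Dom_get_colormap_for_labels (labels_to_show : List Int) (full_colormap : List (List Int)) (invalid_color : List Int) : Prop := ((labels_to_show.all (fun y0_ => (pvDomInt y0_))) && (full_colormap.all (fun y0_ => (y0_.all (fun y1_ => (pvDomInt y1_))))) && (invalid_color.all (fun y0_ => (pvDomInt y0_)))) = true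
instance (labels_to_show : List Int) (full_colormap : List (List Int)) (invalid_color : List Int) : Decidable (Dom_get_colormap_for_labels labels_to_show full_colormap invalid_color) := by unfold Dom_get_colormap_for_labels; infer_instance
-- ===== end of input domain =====

-- ===== PORT A =====
-- A: gather — for each idx in range(len(full_colormap)), append full_colormap[idx]
-- if idx is in labels_to_show, else invalid_color.
def get_colormap_for_labels (labels_to_show : List Int) (full_colormap : List (List Int)) (invalid_color : List Int) : List (List Int) :=
  if labels_to_show.isEmpty then full_colormap
  else
    (PySem.List.pyRange 0 full_colormap.length 1).foldl
      (fun colormap idx =>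
        colormap ++ [if labels_to_show.contains idx then PySem.List.pyGetD full_colormap idx [] else invalid_color])
      []

-- ===== PORT B =====
-- B: one loop iteration of Source B — emit the run of invalid_color before label k, then k's color.
def pvSegStep (fc : List (List Int)) (ic : List Int) (st : List (List Int) × Int) (k : Int) : List (List Int) × Int :=
  (st.1 ++ (List.replicate (k - st.2).toNat ic ++ [PySem.List.pyGetD fc k []]), k + 1)

-- B: sort the distinct in-range labels, then build the result in one pass as runs of
-- invalid_color between consecutive kept labels, followed by the trailing invalid run.
def get_colormap_for_labels_alt (labels_to_show : List Int) (full_colormap : List (List Int)) (invalid_color : List Int) : List (List Int) :=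
  if labels_to_show.isEmpty then full_colormap
  else
    let n : Int := full_colormap.length
    let keep := PySem.List.sorted
      (PySem.Set.ofList (labels_to_show.filter (fun x => decide (0 ≤ x) && decide (x < n))))
      (fun x => x) false
    let st := keep.foldl (pvSegStep full_colormap invalid_color) ([], 0)
    st.1 ++ List.replicate (n - st.2).toNat invalid_color

-- ===== PRECONDITION & SPEC =====
def Spec_get_colormap_for_labels (labels_to_show : List Int) (full_colormap : List (List Int)) (invalid_color : List Int) (out : List (List Int)) : Prop := out = get_colormap_for_labels_alt labels_to_show full_colormap invalid_color
instance (labels_to_show : List Int) (full_colormap : List (List Int)) (invalid_color : List Int) (out : List (List Int)) : Decidable (Spec_get_colormap_for_labels labels_to_show full_colormap invalid_color out) := by unfold Spec_get_colormap_for_labels; infer_instance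

-- ===== CLAIM (what is proved, stated in full; the proofs are below) =====
def Claim_equal_get_colormap_for_labels : Prop := ∀ (labels_to_show : List Int) (full_colormap : List (List Int)) (invalid_color : List Int), Dom_get_colormap_for_labels labels_to_show full_colormap invalid_color → Spec_get_colormap_for_labels labels_to_show full_colormap invalid_color (get_colormap_for_labels labels_to_show full_colormap invalid_color)

-- ===== LEMMAS AND PROOFS =====

-- Invariant of B's segment-building loop over a strictly increasing list of in-range labels:
-- the cursor st.2 equals the output length, the output grows, stays bounded by fc.length,
-- every processed label lies below the cursor, and pointwise the output holds fc's color at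
-- kept labels and ic elsewhere beyond the initial prefix.
theorem pv_seg_loop (fc : List (List Int)) (ic : List Int) :
    ∀ (keep : List Int) (out : List (List Int)) (prev : Int),
      prev = (out.length : Int) →
      prev ≤ (fc.length : Int) →
      (∀ k ∈ keep, prev ≤ k ∧ k < (fc.length : Int)) →
      keep.Pairwise (· < ·) →
      (keep.foldl (pvSegStep fc ic) (out, prev)).2 =
        ((keep.foldl (pvSegStep fc ic) (out, prev)).1.length : Int) ∧
      out.length ≤ (keep.foldl (pvSegStep fc ic) (out, prev)).1.length ∧
      (keep.foldl (pvSegStep fc ic) (out, prev)).2 ≤ (fc.length : Int) ∧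
      (∀ x ∈ keep, x < (keep.foldl (pvSegStep fc ic) (out, prev)).2) ∧
      (∀ j : Nat, j < (keep.foldl (pvSegStep fc ic) (out, prev)).1.length →
        (keep.foldl (pvSegStep fc ic) (out, prev)).1[j]? =
          if j < out.length then out[j]?
          else if (j : Int) ∈ keep then some (fc.getD j []) else some ic) := by
  intro keep
  induction keep with
  | nil =>
    intro out prev h1 h2 _ _
    refine ⟨h1, le_refl _, h2, by simp, ?_⟩
    intro j hj
    simp only [List.foldl_nil] at hj ⊢
    rw [if_pos hj]
  | cons k rest ih =>
    intro out prev h1 h2 hmem hpw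
    obtain ⟨hpk, hkn⟩ := hmem k List.mem_cons_self
    have hklt : ∀ x ∈ rest, k < x := (List.pairwise_cons.mp hpw).1
    have hrep : (k - prev).toNat = k.toNat - out.length := by omega
    simp only [List.foldl_cons]
    set out' := out ++ (List.replicate (k - prev).toNat ic ++ [PySem.List.pyGetD fc k []]) with hout'
    have hstep : pvSegStep fc ic (out, prev) k = (out', k + 1) := rfl
    have hlen' : (out'.length : Int) = k + 1 := by
      simp only [hout', List.length_append, List.length_replicate, List.length_singleton]
      omega
    rw [hstep]
    have ih' := ih out' (k + 1) hlen'.symm (by omega)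
      (fun x hx => ⟨by have := hklt x hx; omega, (hmem x (List.mem_cons_of_mem _ hx)).2⟩)
      (List.pairwise_cons.mp hpw).2
    obtain ⟨a, b, c, d, e⟩ := ih'
    refine ⟨a, ?_, c, ?_, ?_⟩
    · calc out.length ≤ out'.length := by simp [hout']
        _ ≤ _ := b
    · intro x hx
      rcases List.mem_cons.mp hx with h | h
      · rw [h]
        have hb : (out'.length : Int) ≤ (rest.foldl (pvSegStep fc ic) (out', k + 1)).1.length := by
          exact_mod_cast b
        omega
      · exact d x h
    · intro j hj
      rw [e j hj]
      by_cases hj1 : j < out.length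
      · have hj2 : j < out'.length := by simp [hout']; omega
        rw [if_pos hj2, if_pos hj1, hout', List.getElem?_append_left hj1]
      · rw [if_neg hj1]
        by_cases hj2 : j < out'.length
        · rw [if_pos hj2]
          have hjlen : j - out.length < (k - prev).toNat + 1 := by
            simp only [hout', List.length_append, List.length_replicate,
              List.length_singleton] at hj2
            omega
          rw [hout', List.getElem?_append_right (by omega)]
          by_cases hjk : j - out.length < (k - prev).toNat
          · -- inside the replicate run: value ic, and j < k so j is not a kept label
            have hjltk : (j : Int) < k := by omega
            have hnot : (j : Int) ∉ k :: rest := by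
              intro h
              rcases List.mem_cons.mp h with h | h
              · omega
              · have := hklt _ h; omega
            rw [if_neg hnot, List.getElem?_append_left (by simpa using hjk),
              List.getElem?_replicate_of_lt hjk]
          · -- the last slot of this segment: j = k, value full_colormap[k]
            have hjk' : (j : Int) = k := by omega
            have hidx : j - out.length - (List.replicate (k - prev).toNat ic).length = 0 := by
              simp; omega
            rw [List.getElem?_append_right (by simp; omega), hidx]
            have : PySem.List.pyGetD fc k [] = fc.getD j [] := by
              rw [← hjk', PySem.List.pyGetD_natCast]
            simp [this, List.mem_cons, hjk']
        · rw [if_neg hj2]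
          have hjk : (j : Int) ≠ k := by
            have : (k : Int) < out'.length := by omega
            omega
          by_cases hr : (j : Int) ∈ rest
          · rw [if_pos hr, if_pos (List.mem_cons_of_mem _ hr)]
          · rw [if_neg hr, if_neg (by
              intro h
              rcases List.mem_cons.mp h with h | h
              · exact hjk h
              · exact hr h)]

-- ===== VERDICT (by name: the statement is the Claim_ definition above) =====
theorem get_colormap_for_labels_spec : Claim_equal_get_colormap_for_labels := by
  intro l fc ic _
  unfold Spec_get_colormap_for_labels get_colormap_for_labels get_colormap_for_labels_alt
  by_cases hl : l.isEmpty
  · simp [hl]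
  · simp only [hl, Bool.false_eq_true, if_false]
    rw [PySem.List.foldl_append_singleton_eq_map, List.nil_append]
    set n : Int := (fc.length : Int) with hn
    set p : Int → Bool := fun x => decide (0 ≤ x) && decide (x < n) with hp
    set keep := PySem.List.sorted (PySem.Set.ofList (l.filter p)) (fun x => x) false with hkeep
    have hmemkeep : ∀ x : Int, x ∈ keep ↔ (x ∈ l ∧ 0 ≤ x ∧ x < n) := by
      intro x
      rw [hkeep, PySem.List.mem_sorted, PySem.Set.mem_ofList, List.mem_filter, hp]
      simp
    have hbounds : ∀ k ∈ keep, (0 : Int) ≤ k ∧ k < n :=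
      fun k hk => ((hmemkeep k).mp hk).2
    have hpw : keep.Pairwise (· < ·) := PySem.List.sorted_ofList_pairwise_lt _
    obtain ⟨a, _, c, d, e⟩ := pv_seg_loop fc ic keep [] 0 (by simp) (by omega)
      (fun k hk => ⟨(hbounds k hk).1, (hbounds k hk).2⟩) hpw
    set r := keep.foldl (pvSegStep fc ic) ([], 0) with hr
    have hrlen : (r.1.length : Int) ≤ n := by omega
    apply List.ext_getElem?
    intro j
    by_cases hjn : j < fc.length
    · rw [PySem.List.getElem?_map_pyRange_zero _ _ _ hjn]
      by_cases hj1 : j < r.1.length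
      · rw [List.getElem?_append_left hj1, e j hj1]
        simp only [List.length_nil]
        rw [if_neg (Nat.not_lt_zero j)]
        by_cases hjk : (j : Int) ∈ keep
        · have hjl : l.contains (j : Int) = true := by
            simp [((hmemkeep _).mp hjk).1]
          rw [if_pos hjk, hjl, if_pos rfl, PySem.List.pyGetD_natCast]
        · have hjl : l.contains (j : Int) = false := by
            by_contra h
            have : (j : Int) ∈ l := by
              simpa [List.contains_iff_mem] using (Bool.not_eq_false _).mp h
            exact hjk ((hmemkeep _).mpr ⟨this, by omega, by omega⟩)
          rw [if_neg hjk, hjl]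
          simp
      · have hjk : (j : Int) ∉ keep := by
          intro h
          have := d _ h
          omega
        have hjl : l.contains (j : Int) = false := by
          by_contra h
          have : (j : Int) ∈ l := by
            simpa [List.contains_iff_mem] using (Bool.not_eq_false _).mp h
          exact hjk ((hmemkeep _).mpr ⟨this, by omega, by omega⟩)
        rw [hjl]
        simp only [Bool.false_eq_true, if_false]
        rw [List.getElem?_append_right (by omega),
          List.getElem?_replicate_of_lt (by omega)]
    · rw [List.getElem?_eq_none (by
        rw [List.length_map, PySem.List.length_pyRange_one]; omega),
        List.getElem?_eq_none (by
        rw [List.length_append, List.length_replicate]; omega)]
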